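-- pv_equiv track=rewrite | github.com/Cleankz/keymaker | key_m.py | Keymaker
-- ===== SOURCE A (Python) =====
-- def Keymaker(k):
--     keys = []
--     for i in range(k):
--         keys.append(0)
--     step = 1
--     for i in range(k):
--         if step == 1:
--             for j in range(0,k,step):
--                 if keys[j] == 0:
--                     keys[j] += 1
--         elif step == 2:
--             for j in range(1,k,step):
--                 if keys[j] == 1:
--                     keys[j] -= 1
--         elif step == 3:
--             for j in range(2,k,step):
--                 if keys[j] == 1:
--                     keys[j] -= 1
--                 else:
--                     keys[j] += 1
--         else:
--             for j in range(step-1,k,step):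
--                 if keys[j] == 1:
--                     keys[j] -= 1
--                 else:
--                     keys[j] += 1
--
--         step += 1
--     return ("".join(map(str,keys)))
-- ===== SOURCE B (Python) =====
-- def Keymaker(k):
--     out = []
--     r = 1
--     for j in range(k):
--         if r * r == j + 1:
--             out.append("1")
--             r += 1
--         else:
--             out.append("0")
--     return "".join(out)
-- ===== Notes on version B (the rewrite author's own statement) =====
-- stated objective: faster
-- what changed: Replaces the divisor-toggling sieve (one pass per step value over the whole array) by a single pass that emits '1' exactly at perfect-square positions, tracking the next square with a running root counter.
import Mathlib
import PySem

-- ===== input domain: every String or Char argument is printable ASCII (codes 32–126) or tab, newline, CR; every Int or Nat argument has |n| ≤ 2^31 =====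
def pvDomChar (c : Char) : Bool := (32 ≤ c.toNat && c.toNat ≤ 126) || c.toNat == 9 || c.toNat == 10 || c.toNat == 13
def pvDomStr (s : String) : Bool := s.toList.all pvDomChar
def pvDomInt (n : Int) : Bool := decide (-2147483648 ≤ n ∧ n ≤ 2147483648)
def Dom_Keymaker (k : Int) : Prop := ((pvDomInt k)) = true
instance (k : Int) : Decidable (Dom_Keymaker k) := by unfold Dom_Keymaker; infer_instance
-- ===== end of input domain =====

-- B replaces A's divisor-toggling sieve by a single pass emitting '1' exactly at the
-- perfect-square positions, tracked with a running root counter (objective: faster).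

-- ===== PORT A =====
-- the body of A's outer loop: one sieving pass for the current `step`
def keymakerToggle (k : Int) (ks : List Int) (step : Int) : List Int :=
  if step == 1 then
    (PySem.List.pyRange 0 k step).foldl (fun ks j =>
      if PySem.List.pyGetD ks j 0 == 0 then PySem.List.pySetD ks j (PySem.List.pyGetD ks j 0 + 1) else ks) ks
  else if step == 2 then
    (PySem.List.pyRange 1 k step).foldl (fun ks j =>
      if PySem.List.pyGetD ks j 0 == 1 then PySem.List.pySetD ks j (PySem.List.pyGetD ks j 0 - 1) else ks) ks
  else if step == 3 then
    (PySem.List.pyRange 2 k step).foldl (fun ks j =>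
      if PySem.List.pyGetD ks j 0 == 1 then PySem.List.pySetD ks j (PySem.List.pyGetD ks j 0 - 1)
      else PySem.List.pySetD ks j (PySem.List.pyGetD ks j 0 + 1)) ks
  else
    (PySem.List.pyRange (step - 1) k step).foldl (fun ks j =>
      if PySem.List.pyGetD ks j 0 == 1 then PySem.List.pySetD ks j (PySem.List.pyGetD ks j 0 - 1)
      else PySem.List.pySetD ks j (PySem.List.pyGetD ks j 0 + 1)) ks

def Keymaker (k : Int) : String :=
  let keys : List Int := (PySem.List.pyRange 0 k 1).foldl (fun ks _ => ks ++ [(0 : Int)]) []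
  let st := (PySem.List.pyRange 0 k 1).foldl
    (fun (st : List Int × Int) _ => (keymakerToggle k st.1 st.2, st.2 + 1)) (keys, 1)
  PySem.Str.join "" (st.1.map PySem.Int.toStr)

-- ===== PORT B =====
def Keymaker_alt (k : Int) : String :=
  let st := (PySem.List.pyRange 0 k 1).foldl
    (fun (st : List String × Int) j =>
      if st.2 * st.2 == j + 1 then (st.1 ++ ["1"], st.2 + 1) else (st.1 ++ ["0"], st.2))
    ([], 1)
  PySem.Str.join "" st.1

-- ===== PRECONDITION & SPEC =====
def Spec_Keymaker (k : Int) (out : String) : Prop := out = Keymaker_alt k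
instance (k : Int) (out : String) : Decidable (Spec_Keymaker k out) := by unfold Spec_Keymaker; infer_instance

-- ===== CLAIM (what is proved, stated in full; the proofs are below) =====
def Claim_equal_Keymaker : Prop := ∀ (k : Int), Dom_Keymaker k → Spec_Keymaker k (Keymaker k)

-- ===== LEMMAS AND PROOFS =====

-- number of divisors of j+1 among 1..s, and the 0/1 cell value after sieving steps 1..s
def dcnt (j s : Nat) : Nat := ((Finset.Icc 1 s).filter (fun d => d ∣ (j + 1))).card
def aval (j s : Nat) : Int := if dcnt j s % 2 = 1 then 1 else 0
-- B's output character at position j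
def bstr (j : Nat) : String := if Nat.sqrt (j + 1) * Nat.sqrt (j + 1) = j + 1 then "1" else "0"
-- the per-cell update A's pass for a given step performs
def Ft (t : Int) (x : Int) : Int :=
  if t == 1 then (if x == 0 then x + 1 else x)
  else if t == 2 then (if x == 1 then x - 1 else x)
  else (if x == 1 then x - 1 else x + 1)
-- a sieving pass in uniform set-form
def setPass (F : Int → Int) (ps : List Int) (ks : List Int) : List Int :=
  ps.foldl (fun ks p => PySem.List.pySetD ks p (F (PySem.List.pyGetD ks p 0))) ks

lemma setPass_length (F : Int → Int) (ps : List Int) : ∀ ks, (setPass F ps ks).length = ks.length := by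
  induction ps with
  | nil => intro ks; rfl
  | cons p ps ih =>
    intro ks
    simp only [setPass, List.foldl_cons] at *
    rw [ih, PySem.List.length_pySetD]

lemma setPass_getD (F : Int → Int) (ps : List Int) (hnd : ps.Nodup) (hpos : ∀ p ∈ ps, 0 ≤ p) :
    ∀ (ks : List Int) (j : Nat), j < ks.length →
      PySem.List.pyGetD (setPass F ps ks) (j : Int) 0
        = if (j : Int) ∈ ps then F (PySem.List.pyGetD ks (j : Int) 0)
          else PySem.List.pyGetD ks (j : Int) 0 := by
  induction ps with
  | nil => intro ks j hj; simp [setPass]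
  | cons p ps ih =>
    intro ks j hj
    have hp0 : (0:Int) ≤ p := hpos p (by simp)
    have hps : ∀ q ∈ ps, (0:Int) ≤ q := fun q hq => hpos q (by simp [hq])
    have hnd' : ps.Nodup := hnd.of_cons
    have hpn : p ∉ ps := (List.nodup_cons.mp hnd).1
    have hks' : (PySem.List.pySetD ks p (F (PySem.List.pyGetD ks p 0))).length = ks.length :=
      PySem.List.length_pySetD ks p _
    show PySem.List.pyGetD (setPass F ps (PySem.List.pySetD ks p (F (PySem.List.pyGetD ks p 0)))) (j:Int) 0 = _
    rw [ih hnd' hps _ j (by rw [hks']; exact hj)]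
    have hcast : p = ((p.toNat : Nat) : Int) := (Int.toNat_of_nonneg hp0).symm
    by_cases hmem : (j : Int) = p
    · have hjp : j = p.toNat := by omega
      have hnot : ((j : Int)) ∉ ps := by rw [hmem]; exact hpn
      rw [if_neg hnot, if_pos (by simp [hmem])]
      rw [hcast, PySem.List.pyGetD_pySetD_natCast ks p.toNat j _ _ (by omega)]
      rw [if_pos hjp, hjp]
    · have hgd : PySem.List.pyGetD (PySem.List.pySetD ks p (F (PySem.List.pyGetD ks p 0))) (j:Int) 0
          = PySem.List.pyGetD ks (j:Int) 0 := by
        by_cases hrange : p.toNat < ks.length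
        · rw [hcast, PySem.List.pyGetD_pySetD_natCast ks p.toNat j _ _ hrange, if_neg (by omega)]
        · rw [PySem.List.pySetD_of_nonneg ks _ hp0, List.set_eq_of_length_le (by omega)]
      rw [hgd]
      simp [List.mem_cons, hmem]

lemma pySetD_self (ks : List Int) (p : Int) (hp : 0 ≤ p) :
    PySem.List.pySetD ks p (PySem.List.pyGetD ks p 0) = ks := by
  rw [PySem.List.pySetD_of_nonneg ks _ hp]
  by_cases h : p.toNat < ks.length
  · have hc : p = ((p.toNat : Nat) : Int) := (Int.toNat_of_nonneg hp).symm
    rw [hc, PySem.List.pyGetD_natCast, List.getD_eq_getElem _ _ h]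
    simp only [Int.toNat_natCast]
    exact List.set_getElem_self h
  · exact List.set_eq_of_length_le (by omega)

lemma nodup_pyRange_pos (a b s : Int) (hs : 0 < s) : (PySem.List.pyRange a b s).Nodup := by
  rw [PySem.List.pyRange_of_pos a b hs]
  exact List.Nodup.map (fun x y h => by
    have : s * (x:Int) = s * y := by omega
    exact_mod_cast mul_left_cancel₀ (ne_of_gt hs) this) List.nodup_range

lemma mem_pyRange_step (t j : Nat) (k : Int) (ht : 1 ≤ t) (hj : (j : Int) < k) :
    ((j : Int) ∈ PySem.List.pyRange ((t : Int) - 1) k t) ↔ t ∣ (j + 1) := by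
  rw [PySem.List.mem_pyRange_iff_of_pos (by exact_mod_cast ht)]
  constructor
  · rintro ⟨h1, h2, h3⟩
    have h4 : (t:Int) ∣ ((j:Int) - ((t:Int) - 1)) + t := Dvd.dvd.add h3 (dvd_refl _)
    have h5 : ((j:Int) - ((t:Int) - 1)) + t = ((j+1 : Nat) : Int) := by push_cast; ring
    rw [h5] at h4
    exact_mod_cast h4
  · intro h
    have hle : t ≤ j + 1 := Nat.le_of_dvd (by omega) h
    have hd : (t:Int) ∣ ((j+1:Nat):Int) := by exact_mod_cast h
    refine ⟨by omega, hj, ?_⟩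
    have heq : (j:Int) - ((t:Int)-1) = ((j+1:Nat):Int) - t := by push_cast; ring
    rw [heq]
    exact dvd_sub hd (dvd_refl _)

lemma dcnt_succ (j s : Nat) : dcnt j (s + 1) = dcnt j s + (if (s + 1) ∣ (j + 1) then 1 else 0) := by
  unfold dcnt
  have h : Finset.Icc 1 (s+1) = insert (s+1) (Finset.Icc 1 s) := by
    ext d; simp [Finset.mem_Icc]; omega
  rw [h, Finset.filter_insert]
  split_ifs with hd
  · rw [Finset.card_insert_of_notMem (by simp)]
  · rfl

lemma dcnt_zero (j : Nat) : dcnt j 0 = 0 := by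
  unfold dcnt
  rw [Finset.Icc_eq_empty (by omega)]
  rfl

lemma dcnt_one (j : Nat) : dcnt j 1 = 1 := by
  rw [show (1:Nat) = 0 + 1 from rfl, dcnt_succ, dcnt_zero]
  simp

-- keymakerToggle is the uniform set-form pass
lemma toggle_eq (k : Int) (ks : List Int) (t : Int) (ht : 1 ≤ t) :
    keymakerToggle k ks t = setPass (Ft t) (PySem.List.pyRange (t - 1) k t) ks := by
  unfold keymakerToggle setPass
  by_cases h1 : t = 1
  · subst h1
    norm_num
    apply PySem.List.foldl_congr_mem
    intro acc p hp
    have hp0 : (0:Int) ≤ p := by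
      rw [PySem.List.mem_pyRange_one] at hp; exact hp.1
    by_cases hx : PySem.List.pyGetD acc p 0 = 0
    · simp [Ft, hx]
    · simp only [Ft, beq_iff_eq, hx, if_false]
      norm_num
      exact (pySetD_self acc p hp0).symm
  · by_cases h2 : t = 2
    · subst h2
      norm_num [h1]
      apply PySem.List.foldl_congr_mem
      intro acc p hp
      have hp0 : (0:Int) ≤ p := by
        rw [PySem.List.mem_pyRange_iff_of_pos (by norm_num)] at hp
        omega
      by_cases hx : PySem.List.pyGetD acc p 0 = 1
      · simp [Ft, hx]
      · simp only [Ft, beq_iff_eq, hx, if_false]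
        norm_num
        exact (pySetD_self acc p hp0).symm
    · by_cases h3 : t = 3
      · subst h3
        norm_num [h1, h2]
        apply PySem.List.foldl_congr_mem
        intro acc p hp
        by_cases hx : PySem.List.pyGetD acc p 0 = 1
        · simp [Ft, hx]
        · simp [Ft, hx]
      · rw [if_neg (by simpa using h1), if_neg (by simpa using h2), if_neg (by simpa using h3)]
        apply PySem.List.foldl_congr_mem
        intro acc p hp
        by_cases hx : PySem.List.pyGetD acc p 0 = 1
        · simp [Ft, hx, h1, h2]
        · simp [Ft, hx, h1, h2]

-- the cell update matches the divisor-parity evolution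
lemma Ft_aval (j i : Nat) (hdvd : (i + 1) ∣ (j + 1)) :
    Ft ((i : Int) + 1) (aval j i) = aval j (i + 1) := by
  have hflip : dcnt j (i + 1) = dcnt j i + 1 := by
    rw [dcnt_succ, if_pos hdvd]
  match i with
  | 0 =>
    simp [Ft, aval, dcnt_zero, dcnt_one]
  | 1 =>
    simp [Ft, aval, dcnt_one, hflip]
  | (i' + 2) =>
    have ht1 : ((i' + 2 : Nat) : Int) + 1 ≠ 1 := by push_cast; omega
    have ht2 : ((i' + 2 : Nat) : Int) + 1 ≠ 2 := by push_cast; omega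
    rw [Ft, if_neg (by simpa using ht1), if_neg (by simpa using ht2)]
    by_cases hpar : dcnt j (i' + 2) % 2 = 1
    · have hv : aval j (i' + 2) = 1 := by rw [aval, if_pos hpar]
      have hv' : aval j (i' + 2 + 1) = 0 := by rw [aval, hflip, if_neg (by omega)]
      rw [hv, hv']
      norm_num
    · have hv : aval j (i' + 2) = 0 := by rw [aval, if_neg hpar]
      have hv' : aval j (i' + 2 + 1) = 1 := by rw [aval, hflip, if_pos (by omega)]
      rw [hv, hv']
      norm_num

lemma aval_unch (j i : Nat) (hdvd : ¬ (i + 1) ∣ (j + 1)) : aval j (i + 1) = aval j i := by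
  unfold aval
  rw [dcnt_succ, if_neg hdvd, Nat.add_zero]

-- outer-loop plumbing
lemma foldl_ignore {α β : Type} (g : β → β) (l : List α) :
    ∀ init, l.foldl (fun st _ => g st) init = g^[l.length] init := by
  induction l with
  | nil => intro init; rfl
  | cons x xs ih =>
    intro init
    rw [List.foldl_cons, ih, List.length_cons, Function.iterate_succ_apply]

lemma foldl_append_zero (l : List Int) :
    ∀ init : List Int, l.foldl (fun ks _ => ks ++ [(0 : Int)]) init = init ++ List.replicate l.length 0 := by
  induction l with
  | nil => intro init; simp
  | cons x xs ih =>
    intro init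
    rw [List.foldl_cons, ih, List.length_cons, List.replicate_succ]
    simp

-- A's state after i outer iterations
lemma A_state (n : Nat) (i : Nat) :
    (fun st : List Int × Int => (keymakerToggle (n : Int) st.1 st.2, st.2 + 1))^[i]
        (List.replicate n 0, 1)
      = ((List.range n).map (fun j => aval j i), (i : Int) + 1) := by
  induction i with
  | zero =>
    have h0 : (List.range n).map (fun j => aval j 0) = List.replicate n 0 := by
      rw [List.eq_replicate_iff]
      constructor
      · simp
      · intro b hb
        obtain ⟨j, -, rfl⟩ := List.mem_map.mp hb
        rw [aval, dcnt_zero]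
        norm_num
    rw [Function.iterate_zero_apply, h0]
    norm_num
  | succ i ih =>
    rw [Function.iterate_succ_apply', ih]
    have ht : (1:Int) ≤ (i:Int) + 1 := by omega
    have hcast : ((i:Int) + 1) = ((i + 1 : Nat) : Int) := by push_cast; ring
    refine Prod.ext ?_ (by push_cast; ring)
    show keymakerToggle (n:Int) ((List.range n).map (fun j => aval j i)) ((i:Int) + 1)
        = (List.range n).map (fun j => aval j (i + 1))
    rw [toggle_eq _ _ _ ht]
    have hlen : ((List.range n).map (fun j => aval j i)).length = n := by simp
    apply List.ext_getElem
    · rw [setPass_length, hlen]; simp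
    · intro j hj1 hj2
      have hjn : j < n := by
        rw [setPass_length, hlen] at hj1; exact hj1
      have hndp : (PySem.List.pyRange ((i:Int) + 1 - 1) (n:Int) ((i:Int)+1)).Nodup :=
        nodup_pyRange_pos _ _ _ (by omega)
      have hposp : ∀ p ∈ PySem.List.pyRange ((i:Int) + 1 - 1) (n:Int) ((i:Int)+1), (0:Int) ≤ p := by
        intro p hp
        rw [PySem.List.mem_pyRange_iff_of_pos (by omega)] at hp
        omega
      have hget : (setPass (Ft ((i:Int)+1)) (PySem.List.pyRange ((i:Int) + 1 - 1) (n:Int) ((i:Int)+1))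
            ((List.range n).map (fun j => aval j i)))[j]
          = PySem.List.pyGetD (setPass (Ft ((i:Int)+1)) (PySem.List.pyRange ((i:Int) + 1 - 1) (n:Int) ((i:Int)+1))
            ((List.range n).map (fun j => aval j i))) (j : Int) 0 := by
        rw [PySem.List.pyGetD_natCast, List.getD_eq_getElem _ _ hj1]
      rw [hget, setPass_getD _ _ hndp hposp _ j (by rw [hlen]; exact hjn)]
      have hold : PySem.List.pyGetD ((List.range n).map (fun j => aval j i)) (j : Int) 0 = aval j i := by
        rw [PySem.List.pyGetD_natCast, List.getD_eq_getElem _ _ (by simpa using hjn)]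
        simp
      have hmem_iff : ((j:Int) ∈ PySem.List.pyRange ((i:Int) + 1 - 1) (n:Int) ((i:Int)+1)) ↔ (i+1) ∣ (j+1) := by
        have h1 : ((i:Int) + 1 - 1) = (((i+1 : Nat)):Int) - 1 := by push_cast; ring
        have h2 : ((i:Int) + 1) = (((i+1 : Nat)):Int) := by push_cast; ring
        rw [h1, h2, mem_pyRange_step (i+1) j (n:Int) (by omega) (by exact_mod_cast hjn)]
      have hrhs : ((List.range n).map (fun j => aval j (i+1)))[j] = aval j (i+1) := by
        simp
      rw [hrhs, hold]
      by_cases hdvd : (i+1) ∣ (j+1)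
      · rw [if_pos (hmem_iff.mpr hdvd), Ft_aval j i hdvd]
      · rw [if_neg (fun hc => hdvd (hmem_iff.mp hc)), aval_unch j i hdvd]

-- B's state after the whole loop
lemma sqrt_succ (n : Nat) :
    Nat.sqrt (n + 1) = if (Nat.sqrt n + 1) * (Nat.sqrt n + 1) = n + 1 then Nat.sqrt n + 1 else Nat.sqrt n := by
  have h1 : Nat.sqrt n ≤ Nat.sqrt (n + 1) := Nat.sqrt_le_sqrt (by omega)
  have h2 : n < (Nat.sqrt n + 1) * (Nat.sqrt n + 1) := Nat.lt_succ_sqrt n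
  split_ifs with h
  · rw [← h]
    have := Nat.sqrt_eq' (Nat.sqrt n + 1)
    rw [pow_two] at this
    exact this
  · have h3 : Nat.sqrt (n + 1) < Nat.sqrt n + 1 := Nat.sqrt_lt'.mpr (by rw [pow_two]; omega)
    omega

lemma B_state (n : Nat) :
    (PySem.List.pyRange 0 (n : Int) 1).foldl
        (fun (st : List String × Int) j =>
          if st.2 * st.2 == j + 1 then (st.1 ++ ["1"], st.2 + 1) else (st.1 ++ ["0"], st.2))
        ([], 1)
      = ((List.range n).map bstr, (Nat.sqrt n : Int) + 1) := by
  induction n with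
  | zero =>
    rw [show ((0:Nat):Int) = 0 from rfl, PySem.List.pyRange_one_eq_nil (by omega)]
    simp
  | succ n ih =>
    have hsplit : PySem.List.pyRange 0 ((n + 1 : Nat) : Int) 1
        = PySem.List.pyRange 0 (n : Int) 1 ++ [(n : Int)] := by
      have : ((n + 1 : Nat) : Int) = (n : Int) + 1 := by push_cast; ring
      rw [this, PySem.List.pyRange_one_succ_right (by omega)]
    rw [hsplit, List.foldl_append, ih, List.foldl_cons, List.foldl_nil, List.range_succ, List.map_append]
    by_cases h : (Nat.sqrt n + 1) * (Nat.sqrt n + 1) = n + 1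
    · have hc : ((Nat.sqrt n : Int) + 1) * ((Nat.sqrt n : Int) + 1) = (n : Int) + 1 := by exact_mod_cast h
      rw [if_pos (by exact beq_iff_eq.mpr hc)]
      have hs : Nat.sqrt (n + 1) = Nat.sqrt n + 1 := by rw [sqrt_succ, if_pos h]
      have hb : bstr n = "1" := by
        rw [bstr, if_pos (by rw [hs]; exact h)]
      rw [show List.map bstr [n] = [bstr n] from rfl, hb]
      refine Prod.ext rfl ?_
      show (Nat.sqrt n : Int) + 1 + 1 = (Nat.sqrt (n + 1) : Int) + 1
      rw [hs]; push_cast; ring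
    · have hc : ¬ ((Nat.sqrt n : Int) + 1) * ((Nat.sqrt n : Int) + 1) = (n : Int) + 1 := by
        intro hc'; exact h (by exact_mod_cast hc')
      rw [if_neg (by simpa using hc)]
      have hs : Nat.sqrt (n + 1) = Nat.sqrt n := by rw [sqrt_succ, if_neg h]
      have hb : bstr n = "0" := by
        have hle : Nat.sqrt n * Nat.sqrt n ≤ n := Nat.sqrt_le n
        rw [bstr, if_neg (by rw [hs]; omega)]
      rw [show List.map bstr [n] = [bstr n] from rfl, hb]
      refine Prod.ext rfl ?_
      show (Nat.sqrt n : Int) + 1 = (Nat.sqrt (n + 1) : Int) + 1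
      rw [hs]

lemma div_pair (m d : Nat) (hm : 0 < m) (hdvd : d ∣ m) :
    0 < d ∧ 0 < m / d ∧ (m / d) ∣ m ∧ d * (m / d) = m := by
  have hd0 : 0 < d := Nat.pos_of_dvd_of_pos hdvd hm
  have hmul : d * (m / d) = m := Nat.mul_div_cancel' hdvd
  have hq0 : 0 < m / d := by
    rcases Nat.eq_zero_or_pos (m / d) with h | h
    · rw [h, Nat.mul_zero] at hmul; omega
    · exact h
  exact ⟨hd0, hq0, Dvd.intro_left d hmul, hmul⟩

lemma odd_card_divisors_iff (m : Nat) (hm : 0 < m) :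
    (m.divisors.card % 2 = 1) ↔ Nat.sqrt m * Nat.sqrt m = m := by
  classical
  have hm0 : m ≠ 0 := by omega
  have hsplit1 : (m.divisors.filter (fun d => d * d < m)).card
      + (m.divisors.filter (fun d => ¬ d * d < m)).card = m.divisors.card :=
    Finset.card_filter_add_card_filter_not _
  have hsplit2 : ((m.divisors.filter (fun d => ¬ d * d < m)).filter (fun d => d * d = m)).card
      + ((m.divisors.filter (fun d => ¬ d * d < m)).filter (fun d => ¬ d * d = m)).card
      = (m.divisors.filter (fun d => ¬ d * d < m)).card :=
    Finset.card_filter_add_card_filter_not _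
  have hA2 : (m.divisors.filter (fun d => ¬ d * d < m)).filter (fun d => d * d = m)
      = m.divisors.filter (fun d => d * d = m) := by
    rw [Finset.filter_filter]
    apply Finset.filter_congr
    intro d _
    constructor
    · rintro ⟨-, h⟩; exact h
    · intro h; exact ⟨by omega, h⟩
  have hA3 : (m.divisors.filter (fun d => ¬ d * d < m)).filter (fun d => ¬ d * d = m)
      = m.divisors.filter (fun d => m < d * d) := by
    rw [Finset.filter_filter]
    apply Finset.filter_congr
    intro d _
    constructor
    · rintro ⟨h1, h2⟩; omega
    · intro h; omega
  have hbij : (m.divisors.filter (fun d => d * d < m)).card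
      = (m.divisors.filter (fun d => m < d * d)).card := by
    apply Finset.card_bij' (fun d _ => m / d) (fun d _ => m / d)
    · intro d hd
      simp only [Finset.mem_filter, Nat.mem_divisors] at hd ⊢
      obtain ⟨⟨hdvd, -⟩, hlt⟩ := hd
      obtain ⟨hd0, hq0, hqdvd, hmul⟩ := div_pair m d hm hdvd
      refine ⟨⟨hqdvd, hm0⟩, ?_⟩
      have hdq : d < m / d := by
        by_contra hle
        have : d * (m / d) ≤ d * d := Nat.mul_le_mul_left d (by omega)
        omega
      calc m = d * (m / d) := hmul.symm
        _ < (m / d) * (m / d) := (Nat.mul_lt_mul_right hq0).mpr hdq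
    · intro d hd
      simp only [Finset.mem_filter, Nat.mem_divisors] at hd ⊢
      obtain ⟨⟨hdvd, -⟩, hgt⟩ := hd
      obtain ⟨hd0, hq0, hqdvd, hmul⟩ := div_pair m d hm hdvd
      refine ⟨⟨hqdvd, hm0⟩, ?_⟩
      have hdq : m / d < d := by
        by_contra hle
        have : d * d ≤ d * (m / d) := Nat.mul_le_mul_left d (by omega)
        omega
      calc (m / d) * (m / d) < d * (m / d) := (Nat.mul_lt_mul_right hq0).mpr hdq
        _ = m := hmul
    · intro d hd
      simp only [Finset.mem_filter, Nat.mem_divisors] at hd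
      exact Nat.div_div_self hd.1.1 hm0
    · intro d hd
      simp only [Finset.mem_filter, Nat.mem_divisors] at hd
      exact Nat.div_div_self hd.1.1 hm0
  have hA2card : (m.divisors.filter (fun d => d * d = m)).card
      = (if Nat.sqrt m * Nat.sqrt m = m then 1 else 0) := by
    split_ifs with hsq
    · have hset : m.divisors.filter (fun d => d * d = m) = {Nat.sqrt m} := by
        ext d
        simp only [Finset.mem_filter, Nat.mem_divisors, Finset.mem_singleton]
        constructor
        · rintro ⟨-, hdd⟩
          exact Nat.mul_self_inj.mp (hdd.trans hsq.symm)
        · rintro rfl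
          exact ⟨⟨⟨Nat.sqrt m, hsq.symm⟩, hm0⟩, hsq⟩
      rw [hset, Finset.card_singleton]
    · have hset : m.divisors.filter (fun d => d * d = m) = ∅ := by
        ext d
        simp only [Finset.mem_filter, Nat.mem_divisors, Finset.notMem_empty, iff_false, not_and]
        rintro ⟨hdvd, -⟩ hdd
        have : Nat.sqrt m = d := by
          rw [← hdd]
          have h := Nat.sqrt_eq' d
          rw [pow_two] at h
          exact h
        exact hsq (by rw [this, hdd])
      rw [hset, Finset.card_empty]
  rw [hA2, hA3] at hsplit2
  split_ifs at hA2card with hsq <;> simp [hsq] <;> omega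


lemma dcnt_eq_divisors (j n : Nat) (h : j < n) : dcnt j n = (j + 1).divisors.card := by
  unfold dcnt
  congr 1
  ext d
  simp only [Finset.mem_filter, Finset.mem_Icc, Nat.mem_divisors]
  constructor
  · rintro ⟨-, hd⟩; exact ⟨hd, by omega⟩
  · rintro ⟨hd, -⟩
    have h1 : 0 < d := Nat.pos_of_dvd_of_pos hd (by omega)
    have h2 : d ≤ j + 1 := Nat.le_of_dvd (by omega) hd
    exact ⟨⟨h1, by omega⟩, hd⟩

-- ===== VERDICT (by name: the statement is the Claim_ definition above) =====
theorem Keymaker_spec : Claim_equal_Keymaker := by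
  intro k _
  show Keymaker k = Keymaker_alt k
  by_cases hk : k ≤ 0
  · simp [Keymaker, Keymaker_alt, PySem.List.pyRange_one_eq_nil hk]
  · obtain ⟨n, rfl⟩ : ∃ n : Nat, k = (n : Int) := ⟨k.toNat, (Int.toNat_of_nonneg (by omega)).symm⟩
    have hlen : (PySem.List.pyRange 0 (n:Int) 1).length = n := by
      rw [PySem.List.length_pyRange_one]
      simp
    show PySem.Str.join "" (((PySem.List.pyRange 0 (n:Int) 1).foldl
        (fun (st : List Int × Int) _ =>
          (keymakerToggle (n:Int) st.1 st.2, st.2 + 1))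
        ((PySem.List.pyRange 0 (n:Int) 1).foldl (fun ks _ => ks ++ [(0 : Int)]) [], 1)).1.map PySem.Int.toStr)
      = PySem.Str.join "" (((PySem.List.pyRange 0 (n:Int) 1).foldl
        (fun (st : List String × Int) j =>
          if st.2 * st.2 == j + 1 then (st.1 ++ ["1"], st.2 + 1) else (st.1 ++ ["0"], st.2)) ([], 1)).1)
    rw [B_state n, foldl_append_zero, List.nil_append, hlen,
        foldl_ignore (fun st : List Int × Int => (keymakerToggle (n:Int) st.1 st.2, st.2 + 1))
          (PySem.List.pyRange 0 (n:Int) 1), hlen, A_state n n]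
    show PySem.Str.join "" (((List.range n).map (fun j => aval j n)).map PySem.Int.toStr)
      = PySem.Str.join "" ((List.range n).map bstr)
    congr 1
    rw [List.map_map]
    apply List.map_congr_left
    intro j hj
    have hjn : j < n := List.mem_range.mp hj
    show PySem.Int.toStr (aval j n) = bstr j
    rw [aval, bstr, dcnt_eq_divisors j n hjn]
    by_cases hsq : Nat.sqrt (j + 1) * Nat.sqrt (j + 1) = j + 1
    · rw [if_pos ((odd_card_divisors_iff (j + 1) (by omega)).mpr hsq), if_pos hsq]
      decide
    · rw [if_neg (fun hc => hsq ((odd_card_divisors_iff (j + 1) (by omega)).mp hc)), if_neg hsq]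
      decide
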